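-- pv_equiv track=rewrite | github.com/Japyyy/guard-management-system | scripts/scan_guard_license.py | sanitize_name_part
-- ===== SOURCE A (Python) =====
-- NAME_NOISE_PARTS = (
--     "INVEST",
--     "VESTIG",
--     "OFFICE",
--     "PROFESSION",
--     "SECURITY",
--     "LICENSE",
--     "CATEGORY",
--     "PHILIPPINE",
--     "REPUBLIC",
--     "POLICE",
--     "ADDRESS",
--     "PRINTED",
--     "ISSUED",
--     "EXPIRY",
-- )
--
-- NAME_STOPWORDS = {
--     "EFICE",
--     "OFFICE",
--     "FFICE",
--     "FOR",
--     "O",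
--     "OF",
--     "SI",
--     "AND",
--     "THE",
--     "FO",
--     "D",
--     "W",
-- }
--
-- def sanitize_name_part(value):
--     if not value:
--         return ""
--
--     tokens = [token for token in value.split() if token]
--
--     while tokens and any(part in tokens[0] for part in NAME_NOISE_PARTS):
--         tokens.pop(0)
--
--     while tokens and any(part in tokens[-1] for part in NAME_NOISE_PARTS):
--         tokens.pop()
--
--     filtered_tokens = [
--         token
--         for token in tokens
--         if token not in NAME_STOPWORDS and not any(part in token for part in NAME_NOISE_PARTS)
--     ]
--
--     if filtered_tokens:
--         tokens = filtered_tokens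
--
--     if len(tokens) > 1:
--         tokens = tokens[-1:]
--
--     return " ".join(tokens).strip()
-- ===== SOURCE B (Python) =====
-- NAME_NOISE_PARTS = (
--     "INVEST", "VESTIG", "OFFICE", "PROFESSION", "SECURITY", "LICENSE",
--     "CATEGORY", "PHILIPPINE", "REPUBLIC", "POLICE", "ADDRESS", "PRINTED",
--     "ISSUED", "EXPIRY",
-- )
--
-- NAME_STOPWORDS = {
--     "EFICE", "OFFICE", "FFICE", "FOR", "O", "OF", "SI", "AND", "THE",
--     "FO", "D", "W",
-- }
--
-- def sanitize_name_part(value):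
--     if not value:
--         return ""
--     tokens = value.split()
--     filtered = [
--         t for t in tokens
--         if t not in NAME_STOPWORDS and not any(p in t for p in NAME_NOISE_PARTS)
--     ]
--     if filtered:
--         return filtered[-1]
--     # all tokens are stopwords or noise: drop trailing noise tokens, keep the last
--     while tokens and any(p in tokens[-1] for p in NAME_NOISE_PARTS):
--         tokens.pop()
--     return tokens[-1] if tokens else ""
-- ===== Notes on version B (the rewrite author's own statement) =====
-- stated objective: simpler
-- what changed: B filters stopword/noise tokens over the whole token list once and returns the last survivor directly, using the trailing-trim pop loop only as a fallback when nothing survives, instead of A's trim-both-ends then filter then slice-join-strip pipeline.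
import Mathlib
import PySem

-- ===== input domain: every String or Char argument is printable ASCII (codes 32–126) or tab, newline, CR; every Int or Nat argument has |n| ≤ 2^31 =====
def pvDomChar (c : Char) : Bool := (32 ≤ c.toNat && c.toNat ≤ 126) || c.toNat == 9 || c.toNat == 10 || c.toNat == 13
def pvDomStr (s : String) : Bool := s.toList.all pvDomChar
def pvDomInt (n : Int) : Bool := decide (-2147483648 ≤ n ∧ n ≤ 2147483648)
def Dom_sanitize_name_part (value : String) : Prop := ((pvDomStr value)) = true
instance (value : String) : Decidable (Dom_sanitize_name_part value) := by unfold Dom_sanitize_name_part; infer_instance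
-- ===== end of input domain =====

-- B keeps the global stopword/noise filter and returns its last element directly, falling back to
-- trimming trailing noise tokens only when the filter leaves nothing: simpler decomposition, same values.

-- shared module constants (NAME_NOISE_PARTS / NAME_STOPWORDS) and the two membership tests both
-- Python versions spell inline
def pvNoiseParts : List String :=
  ["INVEST","VESTIG","OFFICE","PROFESSION","SECURITY","LICENSE","CATEGORY",
   "PHILIPPINE","REPUBLIC","POLICE","ADDRESS","PRINTED","ISSUED","EXPIRY"]
def pvStopwords : PySem.Set String :=
  PySem.Set.ofList ["EFICE","OFFICE","FFICE","FOR","O","OF","SI","AND","THE","FO","D","W"]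
-- any(part in token for part in NAME_NOISE_PARTS)
def pvNoise (t : String) : Bool := pvNoiseParts.any (fun p => PySem.Str.isIn p t)
-- token in NAME_STOPWORDS
def pvStop (t : String) : Bool := PySem.Set.contains pvStopwords t

-- ===== PORT A =====
def sanitize_name_part (value : String) : String :=
  if value == "" then ""
  else
    -- tokens = [token for token in value.split() if token]
    let tokens0 := (PySem.Str.split₀ value).filter (fun t => !(t == ""))
    -- while tokens and any(part in tokens[0] …): tokens.pop(0)
    let tokens1 := tokens0.dropWhile pvNoise
    -- while tokens and any(part in tokens[-1] …): tokens.pop()   (pop-from-end loop, via reverse)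
    let tokens2 := (tokens1.reverse.dropWhile pvNoise).reverse
    let filtered := tokens2.filter (fun t => !pvStop t && !pvNoise t)
    -- if filtered_tokens: tokens = filtered_tokens
    let tokens3 := if filtered.isEmpty then tokens2 else filtered
    -- if len(tokens) > 1: tokens = tokens[-1:]
    let tokens4 := if tokens3.length > 1 then PySem.List.slice tokens3 (some (-1)) none else tokens3
    PySem.Str.strip (PySem.Str.join " " tokens4)

-- ===== PORT B =====
def sanitize_name_part_alt (value : String) : String :=
  if value == "" then ""
  else
    let tokens := PySem.Str.split₀ value
    let filtered := tokens.filter (fun t => !pvStop t && !pvNoise t)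
    match filtered.getLast? with
    | some t => t          -- return filtered[-1]
    | none =>
      -- while tokens and any(p in tokens[-1] …): tokens.pop()   (pop-from-end loop, via reverse)
      match (tokens.reverse.dropWhile pvNoise).head? with
      | some t => t        -- tokens[-1]
      | none => ""

-- ===== PRECONDITION & SPEC =====
def Spec_sanitize_name_part (value : String) (out : String) : Prop := out = sanitize_name_part_alt value
instance (value : String) (out : String) : Decidable (Spec_sanitize_name_part value out) := by unfold Spec_sanitize_name_part; infer_instance

-- ===== CLAIM (what is proved, stated in full; the proofs are below) =====
def Claim_equal_sanitize_name_part : Prop := ∀ (value : String), Dom_sanitize_name_part value → Spec_sanitize_name_part value (sanitize_name_part value)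

-- ===== LEMMAS AND PROOFS =====

lemma split₀_go_good (s : List Char) :
    ∀ (cur : List Char) (acc : List (List Char)),
      (∀ u ∈ acc, u ≠ [] ∧ ∀ c ∈ u, PySem.Chars.isspace c = false) →
      (∀ c ∈ cur, PySem.Chars.isspace c = false) →
      ∀ t ∈ PySem.Chars.split₀.go s cur acc, t ≠ [] ∧ ∀ c ∈ t, PySem.Chars.isspace c = false := by
  induction s with
  | nil =>
    intro cur acc hacc hcur t ht
    simp only [PySem.Chars.split₀.go] at ht
    by_cases hc : cur.isEmpty
    · rw [if_pos hc, List.mem_reverse] at ht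
      exact hacc t ht
    · rw [if_neg hc, List.mem_reverse, List.mem_cons] at ht
      have hcur_ne : cur ≠ [] := by simpa [List.isEmpty_iff] using hc
      rcases ht with h | h
      · subst h
        exact ⟨by simpa using hcur_ne, fun c hcm => hcur c (List.mem_reverse.mp hcm)⟩
      · exact hacc t h
  | cons c rest ih =>
    intro cur acc hacc hcur t ht
    simp only [PySem.Chars.split₀.go] at ht
    by_cases hs : PySem.Chars.isspace c
    · rw [if_pos hs] at ht
      by_cases hc : cur.isEmpty
      · rw [if_pos hc] at ht
        exact ih [] acc hacc (by simp) t ht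
      · rw [if_neg hc] at ht
        have hcur_ne : cur ≠ [] := by simpa [List.isEmpty_iff] using hc
        refine ih [] (cur.reverse :: acc) ?_ (by simp) t ht
        intro u hu
        rcases List.mem_cons.mp hu with h | h
        · subst h
          exact ⟨by simpa using hcur_ne, fun d hd => hcur d (List.mem_reverse.mp hd)⟩
        · exact hacc u h
    · rw [if_neg hs] at ht
      refine ih (c :: cur) acc hacc ?_ t ht
      intro d hd
      rcases List.mem_cons.mp hd with h | h
      · subst h; exact Bool.eq_false_iff.mpr hs
      · exact hcur d h

lemma split₀_good (v : String) :
    ∀ t ∈ PySem.Str.split₀ v, t.toList ≠ [] ∧ ∀ c ∈ t.toList, PySem.Chars.isspace c = false := by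
  intro t ht
  simp only [PySem.Str.split₀, List.mem_map] at ht
  rcases ht with ⟨u, hu, rfl⟩
  have := split₀_go_good v.toList [] [] (by simp) (by simp) u hu
  simpa using this

lemma strip_good (t : String) (h2 : ∀ c ∈ t.toList, PySem.Chars.isspace c = false) :
    PySem.Str.strip t = t := by
  have hl : PySem.Chars.lstrip t.toList = t.toList := by
    simp only [PySem.Chars.lstrip]
    rw [List.dropWhile_eq_self_iff]
    intro hl
    exact Bool.eq_false_iff.mp (h2 _ (List.getElem_mem hl))
  have hr : PySem.Chars.rstrip t.toList = t.toList := by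
    simp only [PySem.Chars.rstrip]
    rw [List.dropWhile_eq_self_iff.mpr ?_, List.reverse_reverse]
    intro hl
    exact Bool.eq_false_iff.mp (h2 _ (List.mem_reverse.mp (List.getElem_mem hl)))
  simp only [PySem.Str.strip, PySem.Chars.strip, hl, hr]
  exact String.ofList_toList

lemma join_single (t : String) : PySem.Str.join " " [t] = String.ofList t.toList := by
  simp [PySem.Str.join, PySem.Chars.join, List.intercalate]

lemma filter_dropWhile_of_imp {α : Type} (p q : α → Bool) (h : ∀ x, q x = true → p x = false)
    (l : List α) : (l.dropWhile q).filter p = l.filter p := by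
  induction l with
  | nil => rfl
  | cons a l ih =>
    by_cases hq : q a
    · simp [hq, h a hq, ih]
    · simp [hq]

lemma head?_dropWhile_reverse_dropWhile {α : Type} (q : α → Bool) (l : List α) :
    ((l.dropWhile q).reverse.dropWhile q).head? = (l.reverse.dropWhile q).head? := by
  conv_rhs => rw [← List.takeWhile_append_dropWhile (p := q) (l := l)]
  rw [List.reverse_append, List.dropWhile_append]
  by_cases he : ((l.dropWhile q).reverse.dropWhile q).isEmpty
  · simp only [he, if_true]
    have hnil : (l.takeWhile q).reverse.dropWhile q = [] := by
      rw [List.dropWhile_eq_nil_iff]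
      intro x hx
      exact List.mem_takeWhile_imp (List.mem_reverse.mp hx)
    simp [hnil, List.isEmpty_iff.mp he]
  · rw [if_neg (by simpa using he), List.head?_append]
    cases h : ((l.dropWhile q).reverse.dropWhile q).head? with
    | none => simp [List.head?_eq_none_iff.mp h] at he
    | some a => simp

lemma last_slice {α : Type} (l : List α) (h : l ≠ []) :
    (if l.length > 1 then PySem.List.slice l (some (-1)) none else l) = [l.getLast h] := by
  split_ifs with hlen
  · rw [PySem.List.slice_from_neg_one]
    exact List.drop_length_sub_one h
  · have h1 : l.length = 1 := by
      have := List.length_pos_iff.mpr h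
      omega
    obtain ⟨x, rfl⟩ := List.length_eq_one_iff.mp h1
    simp

theorem pv_main (value : String) : sanitize_name_part value = sanitize_name_part_alt value := by
  by_cases hv : (value == "") = true
  · simp [sanitize_name_part, sanitize_name_part_alt, hv]
  · have hv' : (value == "") = false := by simpa using hv
    have hgood := split₀_good value
    set toks := PySem.Str.split₀ value with htoks
    have h0 : toks.filter (fun t => !(t == "")) = toks := by
      rw [List.filter_eq_self]
      intro t ht
      have := (hgood t ht).1
      have hne : t ≠ "" := by intro h; subst h; simp at this
      simp [hne]
    set p : String → Bool := fun t => !pvStop t && !pvNoise t with hp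
    have hpq : ∀ x, pvNoise x = true → p x = false := by
      intro x h; simp [hp, h]
    set r := toks.dropWhile pvNoise with hr
    set T := (r.reverse.dropWhile pvNoise).reverse with hT
    have hTsub : ∀ t ∈ T, t ∈ toks := by
      intro t ht
      rw [hT, List.mem_reverse] at ht
      have := (List.dropWhile_sublist (l := r.reverse) (p := pvNoise)).mem ht
      rw [List.mem_reverse] at this
      exact (List.dropWhile_sublist (l := toks) (p := pvNoise)).mem this
    have hfilt : T.filter p = toks.filter p := by
      rw [hT, List.filter_reverse, filter_dropWhile_of_imp p pvNoise hpq,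
          List.filter_reverse, List.reverse_reverse, hr, filter_dropWhile_of_imp p pvNoise hpq]
    have hA : sanitize_name_part value =
        PySem.Str.strip (PySem.Str.join " "
          (let tokens3 := if (T.filter p).isEmpty then T else T.filter p
           if tokens3.length > 1 then PySem.List.slice tokens3 (some (-1)) none else tokens3)) := by
      simp only [sanitize_name_part, hv', Bool.false_eq_true, if_false, ← htoks, h0, ← hp, ← hr, ← hT]
    have hB : sanitize_name_part_alt value =
        (match (toks.filter p).getLast? with
         | some t => t
         | none =>
           match (toks.reverse.dropWhile pvNoise).head? with
           | some t => t
           | none => "") := by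
      simp only [sanitize_name_part_alt, hv', Bool.false_eq_true, if_false, ← htoks, ← hp]
    rw [hA, hB, hfilt]
    by_cases hF : toks.filter p = []
    · simp only [hF, List.isEmpty_nil, if_true, List.getLast?_nil]
      have hK := head?_dropWhile_reverse_dropWhile pvNoise toks
      rw [← hr] at hK
      by_cases hTe : T = []
      · have hX : r.reverse.dropWhile pvNoise = [] := by
          have := congrArg List.reverse hTe
          rwa [hT, List.reverse_reverse, List.reverse_nil] at this
        rw [hX] at hK
        rw [hTe, ← hK]
        decide
      · have hlast : T.getLast? = some (T.getLast hTe) := List.getLast?_eq_some_getLast hTe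
        have hXhead : (r.reverse.dropWhile pvNoise).head? = some (T.getLast hTe) := by
          rw [← List.getLast?_reverse, ← hT, hlast]
        rw [← hK, hXhead, last_slice T hTe]
        have hmem : T.getLast hTe ∈ toks := hTsub _ (List.getLast_mem hTe)
        rw [join_single, String.ofList_toList]
        exact strip_good _ (hgood _ hmem).2
    · have hne : (toks.filter p).isEmpty = false := by simpa [List.isEmpty_iff] using hF
      simp only [hne, Bool.false_eq_true, if_false]
      rw [last_slice _ hF, List.getLast?_eq_some_getLast hF]
      have hmem : (toks.filter p).getLast hF ∈ toks :=
        List.mem_of_mem_filter (List.getLast_mem hF)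
      rw [join_single, String.ofList_toList]
      exact strip_good _ (hgood _ hmem).2


-- ===== VERDICT (by name: the statement is the Claim_ definition above) =====
theorem sanitize_name_part_spec : Claim_equal_sanitize_name_part := by
  intro value _
  unfold Spec_sanitize_name_part
  exact pv_main value
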